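-- pv_equiv track=rewrite | github.com/hugocarmaga/floco | ln_estimation.py | compute_bins_array
-- ===== SOURCE A (Python) =====
-- def compute_bins_array(bins_node):
--     N_POINTS = 13
--     bins_array = [[] for _ in range(N_POINTS)]
--     for node_bins in bins_node.values():
--         prev_start = len(bins_array[0])
--         bins_array[0].extend(node_bins)
--
--         for i in range(1, N_POINTS):
--             prev_arr = bins_array[i - 1]
--             curr_arr = bins_array[i]
--             curr_start = len(curr_arr)
--
--             prev_len = len(prev_arr)
--             prev_stop = prev_len - (prev_len - prev_start) % 2
--             if prev_start == prev_stop: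
--                 break
--
--             for j in range(prev_start, prev_stop, 2):
--                 curr_arr.append(prev_arr[j] + prev_arr[j + 1])
--
--             bins_array[i] = curr_arr
--             prev_start = curr_start
--
--     return bins_array
-- ===== SOURCE B (Python) =====
-- def compute_bins_array(bins_node):
--     N_POINTS = 13
--     bins_array = [[] for _ in range(N_POINTS)]
--     for node_bins in bins_node.values():
--         # prefix sums over this node's bins: P[k] = sum of the first k values
--         P = [0]
--         s = 0
--         for x in node_bins:
--             s += x
--             P.append(s)
--         n = len(node_bins)
--         # level i entries are block sums of width 2**i, read directly off P
--         for i in range(N_POINTS):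
--             if i > 0 and (n >> i) == 0:
--                 break
--             w = 1 << i
--             bins_array[i].extend(P[(j + 1) * w] - P[j * w] for j in range(n >> i))
--     return bins_array
-- ===== Notes on version B (the rewrite author's own statement) =====
-- stated objective: alternative
-- what changed: B computes each pyramid level directly as block sums of width 2^i read off a per-node prefix-sum array (each level derived independently from the input), instead of A's level-by-level pairwise reduction threaded through shared arrays with prev_start/prev_stop indices.
import Mathlib
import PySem

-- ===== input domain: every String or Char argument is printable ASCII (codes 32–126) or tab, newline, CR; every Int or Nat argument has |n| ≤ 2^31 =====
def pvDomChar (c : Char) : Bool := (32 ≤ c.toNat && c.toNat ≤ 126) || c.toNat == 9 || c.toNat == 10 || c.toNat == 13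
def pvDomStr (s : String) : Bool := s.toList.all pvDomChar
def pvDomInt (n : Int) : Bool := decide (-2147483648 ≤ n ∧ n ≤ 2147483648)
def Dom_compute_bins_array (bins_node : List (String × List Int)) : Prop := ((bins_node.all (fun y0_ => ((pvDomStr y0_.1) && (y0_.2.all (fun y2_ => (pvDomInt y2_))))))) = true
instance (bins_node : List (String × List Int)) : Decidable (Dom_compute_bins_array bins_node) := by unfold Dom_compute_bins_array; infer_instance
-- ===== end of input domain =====

-- B computes every pyramid level directly as block sums of width 2^i read off a per-node
-- prefix-sum array, instead of A's level-by-level pairwise reduction (objective: alternative).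

-- ===== PORT A =====
-- inner `for j in range(prev_start, prev_stop, 2): curr_arr.append(prev_arr[j] + prev_arr[j+1])`
def aPairLoop (prev : List Int) (j stop : Nat) (curr : List Int) : List Int :=
  if j < stop then
    aPairLoop prev (j + 2) stop (curr ++ [prev.getD j 0 + prev.getD (j + 1) 0])
  else curr
termination_by stop - j

-- `for i in range(1, N_POINTS): …` with the `break`
def aNodeLoop (i : Nat) (prev_start : Nat) (arr : List (List Int)) : List (List Int) :=
  if i < 13 then
    let prev_arr := arr.getD (i - 1) []
    let curr_arr := arr.getD i []
    let curr_start := curr_arr.length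
    let prev_len := prev_arr.length
    let prev_stop := prev_len - (prev_len - prev_start) % 2
    if prev_start = prev_stop then arr
    else aNodeLoop (i + 1) curr_start (arr.set i (aPairLoop prev_arr prev_start prev_stop curr_arr))
  else arr
termination_by 13 - i

def compute_bins_array (bins_node : List (String × List Int)) : List (List Int) :=
  (PySem.Dict.ofList bins_node).values.foldl
    (fun arr node_bins =>
      let prev_start := (arr.getD 0 []).length
      aNodeLoop 1 prev_start (arr.set 0 (arr.getD 0 [] ++ node_bins)))
    (List.replicate 13 [])

-- ===== PORT B =====
-- `bins_array[i].extend(P[(j+1)*w] - P[j*w] for j in range(n >> i))` with w = 1 << i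
def bLevel (P : List Int) (n i : Nat) : List Int :=
  (List.range (n >>> i)).map (fun j => P.getD ((j + 1) * (1 <<< i)) 0 - P.getD (j * (1 <<< i)) 0)

-- `for i in range(N_POINTS): if i > 0 and (n >> i) == 0: break; …extend…`
def bNodeLoop (P : List Int) (n : Nat) (i : Nat) (arr : List (List Int)) : List (List Int) :=
  if i < 13 then
    if 0 < i ∧ n >>> i = 0 then arr
    else bNodeLoop P n (i + 1) (arr.set i (arr.getD i [] ++ bLevel P n i))
  else arr
termination_by 13 - i

-- `P = [0]; s = 0; for x in node_bins: s += x; P.append(s)`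
def bPrefix (bins : List Int) : List Int :=
  (bins.foldl (fun ps x => (ps.1 ++ [ps.2 + x], ps.2 + x)) ([0], 0)).1

def compute_bins_array_alt (bins_node : List (String × List Int)) : List (List Int) :=
  (PySem.Dict.ofList bins_node).values.foldl
    (fun arr node_bins =>
      bNodeLoop (bPrefix node_bins) node_bins.length 0 arr)
    (List.replicate 13 [])

-- ===== PRECONDITION & SPEC =====
def Spec_compute_bins_array (bins_node : List (String × List Int)) (out : List (List Int)) : Prop := out = compute_bins_array_alt bins_node
instance (bins_node : List (String × List Int)) (out : List (List Int)) : Decidable (Spec_compute_bins_array bins_node out) := by unfold Spec_compute_bins_array; infer_instance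

-- ===== CLAIM (what is proved, stated in full; the proofs are below) =====
def Claim_equal_compute_bins_array : Prop := ∀ (bins_node : List (String × List Int)), Dom_compute_bins_array bins_node → Spec_compute_bins_array bins_node (compute_bins_array bins_node)

-- ===== LEMMAS AND PROOFS =====

-- pairwise reduction of a level, used only to characterise A's inner loop
def bPairs : List Int → List Int
  | a :: b :: rest => (a + b) :: bPairs rest
  | _ => []

theorem aPairLoop_spec (lvl pre curr : List Int) :
    aPairLoop (pre ++ lvl) pre.length (pre.length + 2 * (lvl.length / 2)) curr
      = curr ++ bPairs lvl := by
  fun_induction bPairs lvl generalizing pre curr with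
  | case1 a b rest ih =>
    rw [aPairLoop]
    have h1 : (pre ++ a :: b :: rest).getD pre.length 0 = a := by
      simp [List.getD]
    have h2 : (pre ++ a :: b :: rest).getD (pre.length + 1) 0 = b := by
      simp [List.getD]
    rw [if_pos (by simp)]
    have hre : pre ++ a :: b :: rest = (pre ++ [a, b]) ++ rest := by simp
    have := ih (pre ++ [a, b]) (curr ++ [a + b])
    simp only [List.length_append, List.length_cons, List.length_nil] at this ⊢
    rw [h1, h2, hre]
    rw [show pre.length + 2 * ((rest.length + 1 + 1) / 2) = pre.length + (0 + 1 + 1) + 2 * (rest.length / 2) by omega,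
        show pre.length + 2 = pre.length + (0 + 1 + 1) by omega]
    simpa using this
  | case2 l h =>
    have h0 : l.length / 2 = 0 := by
      rcases l with _ | ⟨a, _ | ⟨b, t⟩⟩ <;> simp_all
    rw [h0, aPairLoop]
    simp

theorem bPairs_length (l : List Int) : (bPairs l).length = l.length / 2 := by
  fun_induction bPairs l with
  | case1 a b rest ih => simp [bPairs, ih]; omega
  | case2 l h => rcases l with _ | ⟨a, _ | ⟨b, t⟩⟩ <;> simp_all [bPairs]

theorem bPairs_getD (l : List Int) (j : Nat) (h : j < l.length / 2) :
    (bPairs l).getD j 0 = l.getD (2 * j) 0 + l.getD (2 * j + 1) 0 := by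
  fun_induction bPairs l generalizing j with
  | case1 a b rest ih =>
    cases j with
    | zero => simp [List.getD]
    | succ j =>
      simp only [List.length_cons] at h
      have := ih j (by omega)
      simpa [List.getD, show 2 * (j + 1) = 2 * j + 1 + 1 by omega] using this
  | case2 l hne =>
    rcases l with _ | ⟨a, _ | ⟨b, t⟩⟩ <;> simp_all

theorem bPairs_map_range (m : Nat) (f : Nat → Int) :
    bPairs ((List.range m).map f) = (List.range (m / 2)).map (fun j => f (2 * j) + f (2 * j + 1)) := by
  apply List.ext_getElem
  · simp [bPairs_length]
  · intro j h1 h2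
    have hj : j < m / 2 := by simpa [bPairs_length] using h1
    have hlt : 2 * j + 1 < m := by omega
    have := bPairs_getD ((List.range m).map f) j (by simpa using hj)
    rw [List.getD_eq_getElem _ _ h1] at this
    rw [this]
    simp [List.getD_eq_getElem, hlt, Nat.lt_of_le_of_lt (by omega : 2 * j ≤ 2 * j + 1) hlt]

-- characterisation of the prefix-sum list
theorem bPrefix_go (bins : List Int) : ∀ (p : List Int) (s : Int),
    (bins.foldl (fun ps x => (ps.1 ++ [ps.2 + x], ps.2 + x)) (p, s)).1
      = p ++ (List.range bins.length).map (fun k => s + (bins.take (k + 1)).sum) := by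
  induction bins with
  | nil => simp
  | cons x t ih =>
    intro p s
    simp only [List.foldl_cons, List.length_cons, List.range_succ_eq_map]
    rw [ih]
    simp [List.map_map, Function.comp_def, add_assoc]

theorem bPrefix_getD (bins : List Int) (k : Nat) (hk : k ≤ bins.length) :
    (bPrefix bins).getD k 0 = (bins.take k).sum := by
  unfold bPrefix
  rw [bPrefix_go]
  cases k with
  | zero => simp [List.getD]
  | succ m =>
    have hm : m < bins.length := by omega
    simp [List.getD_eq_getElem, List.getElem_append, hm]

-- bLevel in closed form over take-sums
theorem bLevel_eq (bins : List Int) (i : Nat) :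
    bLevel (bPrefix bins) bins.length i
      = (List.range (bins.length >>> i)).map
          (fun j => (bins.take ((j + 1) * 2 ^ i)).sum - (bins.take (j * 2 ^ i)).sum) := by
  unfold bLevel
  apply List.map_congr_left
  intro j hj
  simp only [List.mem_range] at hj
  have hshift : bins.length >>> i = bins.length / 2 ^ i := Nat.shiftRight_eq_div_pow _ _
  have h1 : (j + 1) * 2 ^ i ≤ bins.length := by
    have : j + 1 ≤ bins.length / 2 ^ i := by omega
    calc (j + 1) * 2 ^ i ≤ (bins.length / 2 ^ i) * 2 ^ i := by
          exact Nat.mul_le_mul_right _ this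
      _ ≤ bins.length := Nat.div_mul_le_self _ _
  have h2 : j * 2 ^ i ≤ bins.length := le_trans (by exact Nat.mul_le_mul_right _ (by omega)) h1
  rw [show (1 <<< i) = 2 ^ i from Nat.one_shiftLeft i,
      bPrefix_getD _ _ h1, bPrefix_getD _ _ h2]

theorem bLevel_zero (bins : List Int) :
    bLevel (bPrefix bins) bins.length 0 = bins := by
  rw [bLevel_eq]
  apply List.ext_getElem
  · simp
  · intro j h1 h2
    have hj : j < bins.length := by simpa using h1
    have ht : bins.take (j + 1) = bins.take j ++ [bins[j]] := by
      simpa using List.take_succ (l := bins) (n := j)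
    rw [List.getElem_map, List.getElem_range,
        show (j + 1) * 2 ^ 0 = j + 1 by ring, show j * 2 ^ 0 = j by ring, ht,
        List.sum_append]
    simp

theorem bPairs_bLevel (bins : List Int) (i : Nat) :
    bPairs (bLevel (bPrefix bins) bins.length i) = bLevel (bPrefix bins) bins.length (i + 1) := by
  rw [bLevel_eq, bLevel_eq, bPairs_map_range]
  have hs : bins.length >>> i / 2 = bins.length >>> (i + 1) := by
    rw [Nat.shiftRight_succ]
  rw [hs]
  apply List.map_congr_left
  intro j _
  have e1 : (2 * j + 1 + 1) * 2 ^ i = (j + 1) * 2 ^ (i + 1) := by ring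
  have e2 : 2 * j * 2 ^ i = j * 2 ^ (i + 1) := by ring
  rw [e1, e2]
  ring

theorem bLevel_length (bins : List Int) (i : Nat) :
    (bLevel (bPrefix bins) bins.length i).length = bins.length >>> i := by
  rw [bLevel_eq]; simp

theorem aNodeLoop_eq_bNodeLoop (k : Nat) (i : Nat) (hk : i + k = 13) (hi : 1 ≤ i)
    (bins : List Int)
    (arr : List (List Int)) (hlen : arr.length = 13)
    (pre : List Int)
    (h : arr.getD (i - 1) [] = pre ++ bLevel (bPrefix bins) bins.length (i - 1)) :
    aNodeLoop i pre.length arr = bNodeLoop (bPrefix bins) bins.length i arr := by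
  induction k generalizing i arr pre with
  | zero => rw [aNodeLoop, bNodeLoop]; simp [show ¬ i < 13 by omega]
  | succ k ih =>
    rw [aNodeLoop, bNodeLoop]
    have hi13 : i < 13 := by omega
    rw [if_pos hi13, if_pos hi13]
    simp only [h]
    set lvl := bLevel (bPrefix bins) bins.length (i - 1) with hlvl
    have hlvlen : lvl.length = bins.length >>> (i - 1) := bLevel_length _ _
    have hstop : (pre ++ lvl).length - ((pre ++ lvl).length - pre.length) % 2
        = pre.length + 2 * (lvl.length / 2) := by simp; omega
    rw [hstop]
    have hsucc : bins.length >>> i = bins.length >>> (i - 1) / 2 := by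
      conv_lhs => rw [show i = (i - 1) + 1 by omega]
      rw [Nat.shiftRight_succ]
    by_cases hz : bins.length >>> i = 0
    · rw [if_pos (by omega), if_pos ⟨by omega, hz⟩]
    · rw [if_neg (by omega), if_neg (by simp [hz])]
      set curr := arr.getD i [] with hcurr
      rw [aPairLoop_spec lvl pre curr]
      have hpi : bPairs lvl = bLevel (bPrefix bins) bins.length i := by
        rw [hlvl, bPairs_bLevel, show i - 1 + 1 = i by omega]
      rw [hpi]
      exact ih (i + 1) (by omega) (by omega) _ (by simp [hlen])
        curr (by simp [List.getD, hlen, hi13, hcurr, show i + 1 - 1 = i by omega])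

theorem bNodeLoop_length (P : List Int) (n : Nat) :
    ∀ (k i : Nat) (arr : List (List Int)), i + k = 13 → arr.length = 13 →
      (bNodeLoop P n i arr).length = 13 := by
  intro k
  induction k with
  | zero => intro i arr hik ha; rw [bNodeLoop, if_neg (by omega)]; exact ha
  | succ k ihk =>
    intro i arr hik ha
    rw [bNodeLoop]
    split
    · split
      · exact ha
      · exact ihk _ _ (by omega) (by simp [ha])
    · exact ha

theorem foldl_eq (vals : List (List Int)) (arr : List (List Int)) (hlen : arr.length = 13) :
    vals.foldl (fun arr node_bins =>
      let prev_start := (arr.getD 0 []).length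
      aNodeLoop 1 prev_start (arr.set 0 (arr.getD 0 [] ++ node_bins))) arr
    = vals.foldl (fun arr node_bins =>
      bNodeLoop (bPrefix node_bins) node_bins.length 0 arr) arr := by
  induction vals generalizing arr with
  | nil => rfl
  | cons v vs ih =>
    simp only [List.foldl_cons]
    have hB0 : bNodeLoop (bPrefix v) v.length 0 arr
        = bNodeLoop (bPrefix v) v.length 1 (arr.set 0 (arr.getD 0 [] ++ bLevel (bPrefix v) v.length 0)) := by
      rw [bNodeLoop]
      rw [if_pos (by omega), if_neg (by simp)]
    rw [hB0, bLevel_zero]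
    have h0 : (arr.set 0 (arr.getD 0 [] ++ v)).getD 0 []
        = arr.getD 0 [] ++ bLevel (bPrefix v) v.length 0 := by
      rw [bLevel_zero]; simp [List.getD, hlen]
    rw [aNodeLoop_eq_bNodeLoop 12 1 rfl (by omega) v _ (by simp [hlen]) (arr.getD 0 []) h0]
    exact ih _ (by
      rw [← bLevel_zero (bins := v)] at *
      exact bNodeLoop_length _ _ 12 1 _ rfl (by simp [hlen]))

-- ===== VERDICT (by name: the statement is the Claim_ definition above) =====
theorem compute_bins_array_spec : Claim_equal_compute_bins_array := by
  intro bins_node _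
  unfold Spec_compute_bins_array compute_bins_array compute_bins_array_alt
  exact foldl_eq _ _ (by simp)
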